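-- pv_equiv track=rewrite | github.com/paul6598/PS_practice | 백준/Silver/21314. 민겸 수/민겸 수.py | minmin
-- ===== SOURCE A (Python) =====
-- def minmin(arr):
--   res = ""
--   prev_m = False
--   for i in range(len(arr)):
--     if arr[i] == "K":
--       res += "5"
--     else:
--       if prev_m:
--         res += "0"
--       else:
--         res += "1"
--     if arr[i] == "M":
--       prev_m = True
--     else:
--       prev_m = False
--   return int(res)
-- ===== SOURCE B (Python) =====
-- def minmin(arr):
--     # run-length grouping: each maximal run of equal chars becomes one piece
--     pieces = []
--     prev = ''
--     i = 0
--     n = len(arr)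
--     while i < n:
--         j = i
--         while j < n and arr[j] == arr[i]:
--             j += 1
--         ch, run = arr[i], j - i
--         if ch == 'K':
--             pieces.append('5' * run)
--         elif ch == 'M':
--             pieces.append('1' + '0' * (run - 1))
--         else:
--             pieces.append(('0' if prev == 'M' else '1') + '1' * (run - 1))
--         prev = ch
--         i = j
--     return int(''.join(pieces))
-- ===== Notes on version B (the rewrite author's own statement) =====
-- stated objective: alternative
-- what changed: B replaces A's per-character stateful loop (prev_m flag) with run-length grouping: each maximal run of equal characters is emitted as one piece ('5'*n for K, '1'+'0'*(n-1) for M, and for any other char '0' or '1' depending on whether the previous run was M, then '1'*(n-1)), joined and int-ed.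
import Mathlib
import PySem

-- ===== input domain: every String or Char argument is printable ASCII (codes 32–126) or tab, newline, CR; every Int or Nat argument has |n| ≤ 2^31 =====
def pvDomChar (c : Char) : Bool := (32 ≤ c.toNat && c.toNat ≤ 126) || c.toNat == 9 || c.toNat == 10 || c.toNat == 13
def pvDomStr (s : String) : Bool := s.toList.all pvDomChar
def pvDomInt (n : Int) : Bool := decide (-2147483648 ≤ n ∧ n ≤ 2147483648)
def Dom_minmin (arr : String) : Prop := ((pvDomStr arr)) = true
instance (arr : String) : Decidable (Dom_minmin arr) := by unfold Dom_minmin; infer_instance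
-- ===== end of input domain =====

-- B rewrites A's per-character stateful loop as run-length grouping over maximal runs of
-- equal characters; the two Pythons agree on every non-empty string (both raise ValueError
-- via int('') on the empty string, excluded by Pre_).

-- ===== PORT A =====
-- A's for-loop over arr, state (res, prev_m); res kept as List Char, String.ofList'ed for int().
def minmin (arr : String) : Int :=
  let st := arr.toList.foldl
    (fun (st : List Char × Bool) c =>
      (st.1 ++ [if c = 'K' then '5' else if st.2 then '0' else '1'], c = 'M'))
    ([], false)
  ((PySem.Int.ofStr? (String.ofList st.1)).getD 0)   -- int(res); on "" Python raises (excluded by Pre_)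

-- ===== PORT B =====
-- Source B's inner while-scan "advance j while arr[j] == arr[i]" is exactly span (· = c):
-- runsB returns the maximal runs (char, length) from the front, step for step with Source B.
def runsB (l : List Char) : List (Char × Nat) :=
  match h : l with
  | [] => []
  | c :: cs =>
    let p := cs.span (· = c)
    (c, p.1.length + 1) :: runsB p.2
termination_by l.length
decreasing_by
  simp only [List.span_eq_takeWhile_dropWhile]
  have := List.length_dropWhile_le (p := fun x => decide (x = c)) (l := cs)
  simp; omega

-- one piece per run, as in Source B's if/elif/else
def pieceB (prev c : Char) (n : Nat) : List Char :=
  if c = 'K' then List.replicate n '5'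
  else if c = 'M' then '1' :: List.replicate (n - 1) '0'
  else (if prev = 'M' then '0' else '1') :: List.replicate (n - 1) '1'

-- the while-loop over the runs, carrying prev (Source B starts with prev = '' ; ' ' is the
-- Char stand-in: only "prev == 'M'" is ever tested)
def buildB : Char → List (Char × Nat) → List Char
  | _, [] => []
  | prev, (c, n) :: rs => pieceB prev c n ++ buildB c rs

def minmin_alt (arr : String) : Int :=
  ((PySem.Int.ofStr? (String.ofList (buildB ' ' (runsB arr.toList)))).getD 0)

-- ===== PRECONDITION & SPEC =====
-- Pre_ excludes only the empty string, on which both Pythons raise ValueError (int('')).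
def Pre_minmin (arr : String) : Prop := arr ≠ ""
instance (arr : String) : Decidable (Pre_minmin arr) := by unfold Pre_minmin; infer_instance
def pvWitness_minmin : String := "MKMAA"

def Spec_minmin (arr : String) (out : Int) : Prop := out = minmin_alt arr
instance (arr : String) (out : Int) : Decidable (Spec_minmin arr out) := by unfold Spec_minmin; infer_instance

-- ===== CLAIM (what is proved, stated in full; the proofs are below) =====
def Claim_equal_minmin : Prop := ∀ (arr : String), Dom_minmin arr → Pre_minmin arr → Spec_minmin arr (minmin arr)

-- ===== LEMMAS AND PROOFS =====

-- A's loop without the accumulator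
def loopA : List Char → Bool → List Char
  | [], _ => []
  | c :: cs, p => (if c = 'K' then '5' else if p then '0' else '1') :: loopA cs (c = 'M')

theorem foldl_loopA (l : List Char) (acc : List Char) (p : Bool) :
    (l.foldl (fun (st : List Char × Bool) c =>
      (st.1 ++ [if c = 'K' then '5' else if st.2 then '0' else '1'], c = 'M')) (acc, p)).1
      = acc ++ loopA l p := by
  induction l generalizing acc p with
  | nil => simp [loopA]
  | cons c cs ih => simp [loopA, ih]

theorem loopA_replicate (k : Nat) (c : Char) (rest : List Char) :
    loopA (List.replicate k c ++ rest) (c = 'M')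
      = List.replicate k (if c = 'K' then '5' else if c = 'M' then '0' else '1')
        ++ loopA rest (c = 'M') := by
  induction k with
  | zero => simp
  | succ k ih =>
    simp only [List.replicate_succ, List.cons_append, loopA, ih]
    by_cases hK : c = 'K' <;> by_cases hM : c = 'M' <;> simp [hK, hM]

theorem pieceB_cons (prev c : Char) (k : Nat) (hp : prev = 'M' → c ≠ 'M') :
    pieceB prev c (k + 1)
      = (if c = 'K' then '5' else if (prev = 'M') then '0' else '1')
        :: List.replicate k (if c = 'K' then '5' else if c = 'M' then '0' else '1') := by
  unfold pieceB
  by_cases hK : c = 'K'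
  · simp [hK, List.replicate_succ]
  · by_cases hM : c = 'M'
    · have : ¬ prev = 'M' := fun h => (hp h) hM
      simp [hM, this]
    · simp [hK, hM]

theorem loopA_eq_buildB (l : List Char) (prev : Char)
    (h : prev = 'M' → l.head? ≠ some 'M') :
    loopA l ((prev = 'M') : Bool) = buildB prev (runsB l) := by
  match l with
  | [] => simp [loopA, runsB, buildB]
  | c :: cs =>
    have hspan : cs.span (· = c) = (cs.takeWhile (· = c), cs.dropWhile (· = c)) :=
      List.span_eq_takeWhile_dropWhile ..
    rw [runsB]
    simp only [hspan]
    rw [buildB]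
    have htake : cs.takeWhile (· = c) = List.replicate (cs.takeWhile (· = c)).length c := by
      apply List.eq_replicate_of_mem
      intro b hb
      have := List.mem_takeWhile_imp hb
      simpa using this
    have hdec : cs = cs.takeWhile (· = c) ++ cs.dropWhile (· = c) :=
      (List.takeWhile_append_dropWhile).symm
    have hhead : c = 'M' → (cs.dropWhile (· = c)).head? ≠ some 'M' := by
      intro hcM hcon
      have := List.head?_dropWhile_not (p := (· = c)) (l := cs)
      rw [hcon] at this
      simp [hcM] at this
    have hrest : loopA (cs.dropWhile (· = c)) ((c = 'M') : Bool)
        = buildB c (runsB (cs.dropWhile (· = c))) :=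
      loopA_eq_buildB (cs.dropWhile (· = c)) c hhead
    rw [pieceB_cons prev c (cs.takeWhile (· = c)).length
      (by intro hp; have := h hp; simpa using this)]
    rw [loopA]
    simp only [List.cons_append]
    congr 1
    · simp
    · conv_lhs => rw [hdec, htake]
      rw [loopA_replicate, hrest]
termination_by l.length
decreasing_by
  have := List.length_dropWhile_le (p := (· = c)) (l := cs)
  simp only [List.length_cons]
  omega

-- ===== VERDICT (by name: the statement is the Claim_ definition above) =====
theorem minmin_spec : Claim_equal_minmin := by
  intro arr _ _
  unfold Spec_minmin minmin minmin_alt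
  have := foldl_loopA arr.toList [] false
  simp only [this, List.nil_append]
  have hb : (false : Bool) = ((' ' = 'M') : Bool) := by decide
  rw [hb, loopA_eq_buildB arr.toList ' ' (by intro h; cases h)]
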